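-- pv_equiv track=rewrite | github.com/fbgjung/studyAlgorithm | programmers/algorithm/입국심사.py | solution
-- ===== SOURCE A (Python) =====
-- def solution(n, times):
--     answer = 0
--     left = min(times)
--     right = max(times) * n
--
--     while left <= right:
--         people = 0
--         mid = (left + right) // 2
--         for time in times:
--             people += mid // time
--             if people >= n:
--                 break
--
--         if people >= n:
--             answer = mid
--             right = mid-1
--         else:
--             left = mid +1
--
--     return answer
-- ===== SOURCE B (Python) =====
-- def _step(n, times, mn, t, c):
--     # deficit-based safe jump: capacity can grow by at most len(times)*(d//mn) + len(times)
--     # over any advance d, so every t' in the skipped stretch stays infeasible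
--     m = len(times)
--     q = (n - c - m - 1) // m
--     jump = q * mn + mn if q >= 0 else 0
--     # event jump: capacity is constant strictly before the next multiple of some service time
--     event = min(x - t % x for x in times)
--     return max(jump, event, 1)  # always advance at least one tick
--
--
-- def solution(n, times):
--     mn = min(times)
--     hi = max(times) * n
--     t = mn
--     while t <= hi:
--         c = 0
--         for x in times:
--             c += t // x
--         if c >= n:
--             return t
--         t += _step(n, times, mn, t, c)
--     return 0
-- ===== Notes on version B (the rewrite author's own statement) =====
-- stated objective: alternative
-- what changed: Replaces the binary search (answer accumulator, early-break inner loop) by a forward jump-scan for the first t in [min(times), max(times)*n] whose full capacity sum reaches n: from an infeasible t it advances by the larger of the next completion event and a deficit-based safe jump, returning 0 when the range is empty.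
-- outside the precondition, e.g. on solution(1, [-2, -4, 4]): A returns 0, B returns -4; on solution(1, [0]): A raises ZeroDivisionError, B raises ZeroDivisionError
import Mathlib
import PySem

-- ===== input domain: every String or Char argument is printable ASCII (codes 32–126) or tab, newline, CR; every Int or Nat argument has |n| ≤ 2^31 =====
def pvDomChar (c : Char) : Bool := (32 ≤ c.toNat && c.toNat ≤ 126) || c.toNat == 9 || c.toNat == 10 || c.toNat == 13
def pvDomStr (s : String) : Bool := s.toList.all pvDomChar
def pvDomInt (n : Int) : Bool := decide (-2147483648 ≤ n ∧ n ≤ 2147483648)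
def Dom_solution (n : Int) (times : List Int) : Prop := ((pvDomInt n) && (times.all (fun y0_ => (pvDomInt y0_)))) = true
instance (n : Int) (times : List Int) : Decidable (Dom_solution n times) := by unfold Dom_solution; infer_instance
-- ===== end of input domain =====

-- B replaces A's binary search by a forward jump-scan for the first feasible time; objective: alternative.


-- ===== PORT A =====
-- the inner 'for time in times' loop with its early break
def pvPeopleA (n mid : Int) : List Int → Int → Int
  | [], people => people
  | time :: rest, people =>
    let people' := people + PySem.Int.floordiv mid time
    if n ≤ people' then people' else pvPeopleA n mid rest people'

-- the 'while left <= right' binary-search loop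
def pvLoopA (n : Int) (times : List Int) (left right answer : Int) : Int :=
  if _h : left ≤ right then
    if n ≤ pvPeopleA n (PySem.Int.floordiv (left + right) 2) times 0 then
      pvLoopA n times left (PySem.Int.floordiv (left + right) 2 - 1)
        (PySem.Int.floordiv (left + right) 2)
    else pvLoopA n times (PySem.Int.floordiv (left + right) 2 + 1) right answer
  else answer
termination_by (right + 1 - left).toNat
decreasing_by
  · have := PySem.Int.floordiv_two_mid_bounds _h; omega
  · have := PySem.Int.floordiv_two_mid_bounds _h; omega

def solution (n : Int) (times : List Int) : Int :=
  match PySem.List.min? times (fun x => x), PySem.List.max? times (fun x => x) with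
  | some mn, some mx => pvLoopA n times mn (mx * n) 0
  | _, _ => 0   -- Python raises ValueError on empty times; excluded by Pre_solution

-- ===== PORT B =====
-- Source B's _step: the safe advance from an infeasible t with capacity c
def pvStepB (n : Int) (times : List Int) (mn t c : Int) : Int :=
  let m : Int := times.length
  let q := PySem.Int.floordiv (n - c - m - 1) m
  let jump := if 0 ≤ q then q * mn + mn else 0
  let event := (PySem.List.min? (times.map fun x => x - PySem.Int.mod t x) (fun y => y)).getD 0
  max (max jump event) 1

-- Source B's 'while t <= hi' scan; the Nat fuel only totalises the recursion (the loop
-- advances by ≥ 1 each iteration under Pre_solution, so this fuel is never exhausted)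
def pvScanB (n mn : Int) (times : List Int) : Nat → Int → Int → Int
  | 0, _, _ => 0
  | fuel + 1, t, hi =>
    if t ≤ hi then
      if n ≤ times.foldl (fun c x => c + PySem.Int.floordiv t x) 0 then t
      else pvScanB n mn times fuel
        (t + pvStepB n times mn t (times.foldl (fun c x => c + PySem.Int.floordiv t x) 0)) hi
    else 0

def solution_alt (n : Int) (times : List Int) : Int :=
  match PySem.List.min? times (fun x => x) with
  | none => 0   -- Python raises ValueError on empty times; excluded by Pre_solution
  | some mn =>
    match PySem.List.max? times (fun x => x) with
    | none => 0
    | some mx => pvScanB n mn times (mx * n + 1 - mn).toNat mn (mx * n)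

-- ===== PRECONDITION & SPEC =====
-- Pre_ excludes the empty list (min raises ValueError) and inputs with a non-positive service
-- time whose while-loop actually runs (max*n >= min): a zero time then raises ZeroDivisionError,
-- and on negative times the capacity sum is not monotone, so A's bisection result is an accident
-- of its probing order; inputs whose loop never runs (max(times)*n < min(times)) stay admitted.
def Pre_solution (n : Int) (times : List Int) : Prop :=
  times ≠ [] ∧
    ((∀ t ∈ times, 1 ≤ t) ∨
      ((PySem.List.max? times (fun x => x)).getD 0) * n <
        ((PySem.List.min? times (fun x => x)).getD 0))
instance (n : Int) (times : List Int) : Decidable (Pre_solution n times) := by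
  unfold Pre_solution; infer_instance

def pvWitness_solution : Int × List Int := (6, [7, 10])

def Spec_solution (n : Int) (times : List Int) (out : Int) : Prop := out = solution_alt n times
instance (n : Int) (times : List Int) (out : Int) : Decidable (Spec_solution n times out) := by unfold Spec_solution; infer_instance

-- ===== CLAIM (what is proved, stated in full; the proofs are below) =====
def Claim_equal_solution : Prop := ∀ (n : Int) (times : List Int), Dom_solution n times → Pre_solution n times → Spec_solution n times (solution n times)

-- ===== LEMMAS AND PROOFS =====

-- capacity of the desks at time t (B's inner accumulation)
def pvCap (times : List Int) (t : Int) : Int :=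
  times.foldl (fun c time => c + PySem.Int.floordiv t time) 0

lemma pvFdiv_bounds {a b : Int} (hb : 0 < b) :
    PySem.Int.floordiv a b * b ≤ a ∧ a < PySem.Int.floordiv a b * b + b := by
  have h := PySem.Int.floordiv_mul_add_mod a b
  have h1 := PySem.Int.mod_nonneg a hb
  have h2 := PySem.Int.mod_lt a hb
  omega

lemma pvFdiv_nonneg {a b : Int} (ha : 0 ≤ a) (hb : 0 < b) : 0 ≤ PySem.Int.floordiv a b :=
  (PySem.Int.le_floordiv_iff_mul_le hb).2 (by omega)

-- floor division is superadditive up to 1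
lemma pvFdiv_superadd {t d b : Int} (hb : 0 < b) :
    PySem.Int.floordiv (t + d) b ≤ PySem.Int.floordiv t b + PySem.Int.floordiv d b + 1 := by
  by_contra hcon
  have h : (PySem.Int.floordiv t b + PySem.Int.floordiv d b + 2) * b ≤ t + d :=
    (PySem.Int.le_floordiv_iff_mul_le hb).1 (by omega)
  have h1 := (pvFdiv_bounds (a := t) hb).2
  have h2 := (pvFdiv_bounds (a := d) hb).2
  have hring : (PySem.Int.floordiv t b + PySem.Int.floordiv d b + 2) * b =
      PySem.Int.floordiv t b * b + PySem.Int.floordiv d b * b + b + b := by ring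
  linarith

-- a smaller positive divisor gives a no-smaller quotient (for a nonneg dividend)
lemma pvFdiv_div_mono {d b c : Int} (hd : 0 ≤ d) (hc : 0 < c) (hcb : c ≤ b) :
    PySem.Int.floordiv d b ≤ PySem.Int.floordiv d c := by
  have hb : 0 < b := lt_of_lt_of_le hc hcb
  have h0 : 0 ≤ PySem.Int.floordiv d b := pvFdiv_nonneg hd hb
  refine (PySem.Int.le_floordiv_iff_mul_le hc).2 ?_
  calc PySem.Int.floordiv d b * c ≤ PySem.Int.floordiv d b * b :=
        mul_le_mul_of_nonneg_left hcb h0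
    _ ≤ d := (pvFdiv_bounds hb).1

-- before the next multiple of b the quotient does not move
lemma pvFdiv_const {t d b : Int} (hb : 0 < b) (hd : 0 ≤ d) (hlt : d < b - PySem.Int.mod t b) :
    PySem.Int.floordiv (t + d) b = PySem.Int.floordiv t b := by
  have h := PySem.Int.floordiv_mul_add_mod t b
  have h1 := PySem.Int.mod_nonneg t hb
  refine (PySem.Int.floordiv_eq_iff_of_pos hb).2 ⟨by omega, ?_⟩
  have hring : (PySem.Int.floordiv t b + 1) * b = PySem.Int.floordiv t b * b + b := by ring
  omega

lemma pvFoldl_shift (g : Int → Int) (l : List Int) :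
    ∀ a s : Int, l.foldl (fun c x => c + g x) (a + s) = l.foldl (fun c x => c + g x) a + s := by
  induction l with
  | nil => intro a s; simp
  | cons x xs ih =>
    intro a s
    simp only [List.foldl]
    have h : a + s + g x = a + g x + s := by ring
    rw [h, ih]

lemma pvFoldl_congr_fn (g1 g2 : Int → Int) (l : List Int) (h : ∀ x ∈ l, g1 x = g2 x) :
    ∀ a : Int, l.foldl (fun c x => c + g1 x) a = l.foldl (fun c x => c + g2 x) a := by
  induction l with
  | nil => intro a; simp
  | cons x xs ih =>
    intro a
    simp only [List.foldl]
    rw [h x (by simp), ih (fun y hy => h y (by simp [hy]))]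

lemma pvFoldl_le_add (g1 g2 : Int → Int) (K : Int) (l : List Int)
    (h : ∀ x ∈ l, g1 x ≤ g2 x + K) :
    ∀ a : Int, l.foldl (fun c x => c + g1 x) a ≤
      l.foldl (fun c x => c + g2 x) a + K * (l.length : Int) := by
  induction l with
  | nil => intro a; simp
  | cons x xs ih =>
    intro a
    simp only [List.foldl, List.length_cons]
    have hx := h x (by simp)
    have h1 := ih (fun y hy => h y (by simp [hy])) (a + g1 x)
    have h2 : xs.foldl (fun c x => c + g2 x) (a + g1 x) =
        xs.foldl (fun c x => c + g2 x) (a + g2 x) + (g1 x - g2 x) := by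
      have : a + g1 x = a + g2 x + (g1 x - g2 x) := by ring
      rw [this, pvFoldl_shift]
    have hcast : ((xs.length + 1 : Nat) : Int) = (xs.length : Int) + 1 := by push_cast; ring
    rw [hcast]
    have hring : K * ((xs.length : Int) + 1) = K * (xs.length : Int) + K := by ring
    omega

lemma pvFoldl_le (l : List Int) (mid : Int) (hpos : ∀ x ∈ l, 1 ≤ x) (hm : 0 ≤ mid) :
    ∀ acc : Int, acc ≤ l.foldl (fun c time => c + PySem.Int.floordiv mid time) acc := by
  induction l with
  | nil => intro acc; simp
  | cons x xs ih =>
    intro acc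
    have hx : 1 ≤ x := hpos x (by simp)
    have h0 : 0 ≤ PySem.Int.floordiv mid x := pvFdiv_nonneg hm (by omega)
    have := ih (fun y hy => hpos y (by simp [hy])) (acc + PySem.Int.floordiv mid x)
    simpa [List.foldl] using le_trans (by omega) this

lemma pvFoldl_mono (l : List Int) (hpos : ∀ x ∈ l, 1 ≤ x) (t t' : Int) (ht : t ≤ t') :
    ∀ acc acc' : Int, acc ≤ acc' →
      l.foldl (fun c time => c + PySem.Int.floordiv t time) acc ≤
      l.foldl (fun c time => c + PySem.Int.floordiv t' time) acc' := by
  induction l with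
  | nil => intro acc acc' h; simpa using h
  | cons x xs ih =>
    intro acc acc' h
    have hx : 1 ≤ x := hpos x (by simp)
    have hdiv : PySem.Int.floordiv t x ≤ PySem.Int.floordiv t' x := by
      rw [PySem.Int.floordiv_eq_ediv_of_pos (by omega), PySem.Int.floordiv_eq_ediv_of_pos (by omega)]
      exact Int.ediv_le_ediv (by omega) ht
    simp only [List.foldl]
    exact ih (fun y hy => hpos y (by simp [hy])) _ _ (by omega)

lemma pvCap_mono (times : List Int) (hpos : ∀ x ∈ times, 1 ≤ x) {t t' : Int} (ht : t ≤ t') :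
    pvCap times t ≤ pvCap times t' :=
  pvFoldl_mono times hpos t t' ht 0 0 le_rfl

-- capacity does not move strictly before the next completion event
lemma pvCap_const (times : List Int) (hpos : ∀ x ∈ times, 1 ≤ x) (t d : Int) (hd : 0 ≤ d)
    (hev : ∀ x ∈ times, d < x - PySem.Int.mod t x) :
    pvCap times (t + d) = pvCap times t := by
  unfold pvCap
  exact pvFoldl_congr_fn _ _ times
    (fun x hx => pvFdiv_const (by have := hpos x hx; omega) hd (hev x hx)) 0

-- capacity grows by at most (d//mn + 1) per desk over an advance of d
lemma pvCap_growth (times : List Int) (hpos : ∀ x ∈ times, 1 ≤ x) (mn : Int)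
    (hmnle : ∀ x ∈ times, mn ≤ x) (hmn1 : 1 ≤ mn) (t d : Int) (hd : 0 ≤ d) :
    pvCap times (t + d) ≤ pvCap times t +
      (PySem.Int.floordiv d mn + 1) * (times.length : Int) := by
  unfold pvCap
  refine pvFoldl_le_add _ _ _ times (fun x hx => ?_) 0
  have hx1 : 1 ≤ x := hpos x hx
  have h1 := pvFdiv_superadd (t := t) (d := d) (b := x) (by omega)
  have h2 := pvFdiv_div_mono hd (by omega : (0:Int) < mn) (hmnle x hx)
  omega

-- A's early-break accumulation reaches n iff the full capacity sum does
lemma pvPeople_iff (n mid : Int) (hm : 0 ≤ mid) :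
    ∀ (l : List Int), (∀ x ∈ l, 1 ≤ x) → ∀ p : Int,
      (n ≤ pvPeopleA n mid l p ↔
       n ≤ l.foldl (fun c time => c + PySem.Int.floordiv mid time) p) := by
  intro l
  induction l with
  | nil => intro _ p; simp [pvPeopleA]
  | cons x xs ih =>
    intro hpos p
    have hx : 1 ≤ x := hpos x (by simp)
    have hxs : ∀ y ∈ xs, 1 ≤ y := fun y hy => hpos y (by simp [hy])
    by_cases hb : n ≤ p + PySem.Int.floordiv mid x
    · have hge := pvFoldl_le xs mid hxs hm (p + PySem.Int.floordiv mid x)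
      simp only [pvPeopleA, List.foldl, if_pos hb]
      exact ⟨fun _ => le_trans hb hge, fun _ => hb⟩
    · simp only [pvPeopleA, List.foldl, if_neg hb]
      exact ih hxs (p + PySem.Int.floordiv mid x)

-- the step B takes is always ≥ 1
lemma pvStep_pos (n : Int) (times : List Int) (mn t c : Int) :
    1 ≤ pvStepB n times mn t c := by
  simp only [pvStepB]
  omega

-- every point strictly inside B's jump is still infeasible
lemma pvStep_safe (n : Int) (times : List Int) (mn t : Int)
    (hne : times ≠ []) (hpos : ∀ x ∈ times, 1 ≤ x)
    (hmnle : ∀ x ∈ times, mn ≤ x) (hmn1 : 1 ≤ mn)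
    (hc : pvCap times t < n) :
    ∀ d : Int, 1 ≤ d → d < pvStepB n times mn t (pvCap times t) →
      pvCap times (t + d) < n := by
  intro d hd1 hdlt
  have hmapne : times.map (fun x => x - PySem.Int.mod t x) ≠ [] := by simpa using hne
  cases hmin : PySem.List.min? (times.map fun x => x - PySem.Int.mod t x) (fun y => y) with
  | none => exact absurd ((PySem.List.min?_eq_none_iff _ _).1 hmin) hmapne
  | some e =>
    have hemin := PySem.List.min?_isMin hmin
    simp only [pvStepB, hmin, Option.getD_some] at hdlt
    by_cases hde : d < e
    · -- inside the event gap: capacity is unchanged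
      have heq : pvCap times (t + d) = pvCap times t := by
        refine pvCap_const times hpos t d (by omega) (fun x hx => ?_)
        have := hemin (x - PySem.Int.mod t x) (List.mem_map.2 ⟨x, hx, rfl⟩)
        simp only at this
        omega
      rw [heq]; exact hc
    · -- beyond the event: the deficit jump was taken, use the growth bound
      set m : Int := (times.length : Int) with hm
      set q := PySem.Int.floordiv (n - pvCap times t - m - 1) m with hq
      have hm1 : 1 ≤ m := by
        have : 0 < times.length := List.length_pos_iff.2 hne
        omega
      -- beyond the event and d ≥ 1: the deficit jump must dominate
      have he1 : 1 ≤ e := by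
        obtain ⟨x, hx, hxe⟩ := List.mem_map.1 (PySem.List.min?_mem hmin)
        have hx1 : 1 ≤ x := hpos x hx
        have hmod := PySem.Int.mod_lt t (b := x) (by omega)
        omega
      have hkey : 0 ≤ q ∧ d < q * mn + mn := by
        by_cases hq0 : 0 ≤ q
        · rw [if_pos hq0] at hdlt
          exact ⟨hq0, by omega⟩
        · rw [if_neg hq0] at hdlt
          exact (by omega : False).elim
      obtain ⟨hq0, hjump⟩ := hkey
      have hdq : PySem.Int.floordiv d mn ≤ q := by
        have hlt2 : d < (q + 1) * mn := by
          have hr : (q + 1) * mn = q * mn + mn := by ring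
          linarith
        have := (PySem.Int.floordiv_lt_iff_lt_mul (a := d) (q := q + 1)
          (by omega : (0:Int) < mn)).2 hlt2
        omega
      have hqm : q * m ≤ n - pvCap times t - m - 1 := by
        have h := PySem.Int.floordiv_mul_add_mod (n - pvCap times t - m - 1) m
        have h1 := PySem.Int.mod_nonneg (n - pvCap times t - m - 1) (by omega : (0:Int) < m)
        rw [← hq] at h
        omega
      have hgrow := pvCap_growth times hpos mn hmnle hmn1 t d (by omega)
      have hmul : (PySem.Int.floordiv d mn + 1) * m ≤ (q + 1) * m :=
        mul_le_mul_of_nonneg_right (by omega) (by omega)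
      have hr : (q + 1) * m = q * m + m := by ring
      linarith

-- B's scan returns the first feasible time
lemma pvScan_eq_first (n : Int) (times : List Int) (mn : Int)
    (hne : times ≠ []) (hpos : ∀ x ∈ times, 1 ≤ x)
    (hmnle : ∀ x ∈ times, mn ≤ x) (hmn1 : 1 ≤ mn) (x : Int) :
    ∀ (fuel : Nat) (t hi : Int), (hi + 1 - t).toNat ≤ fuel →
      t ≤ x → x ≤ hi → n ≤ pvCap times x →
      (∀ u, t ≤ u → u < x → ¬ n ≤ pvCap times u) →
      pvScanB n mn times fuel t hi = x := by
  intro fuel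
  induction fuel with
  | zero => intro t hi hk h1 h2 _ _; omega
  | succ fuel ih =>
    intro t hi hk h1 h2 hPx hbelow
    rw [pvScanB]
    rw [if_pos (by omega : t ≤ hi)]
    have hfold : times.foldl (fun c x => c + PySem.Int.floordiv t x) 0 = pvCap times t := rfl
    rw [hfold]
    by_cases hc : n ≤ pvCap times t
    · rw [if_pos hc]
      by_contra hne'
      exact hbelow t le_rfl (by omega) hc
    · rw [if_neg hc]
      have hcap : pvCap times t < n := by omega
      have htx : t < x := by
        rcases lt_or_eq_of_le h1 with h | h
        · exact h
        · exact absurd (h ▸ hPx : n ≤ pvCap times t) (by omega)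
      have hstep1 : 1 ≤ pvStepB n times mn t (pvCap times t) :=
        pvStep_pos n times mn t _
      have hsafe := pvStep_safe n times mn t hne hpos hmnle hmn1 hcap
      have hle : t + pvStepB n times mn t (pvCap times t) ≤ x := by
        by_contra hgt
        have hd := hsafe (x - t) (by omega) (by omega)
        rw [show t + (x - t) = x by ring] at hd
        omega
      exact ih _ hi (by omega) hle h2 hPx (fun u hu1 hu2 => hbelow u (by omega) hu2)

-- B's scan returns 0 when nothing in [t, hi] is feasible
lemma pvScan_eq_zero (n : Int) (times : List Int) (mn : Int) :
    ∀ (fuel : Nat) (t hi : Int),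
      (∀ u, t ≤ u → u ≤ hi → ¬ n ≤ pvCap times u) →
      pvScanB n mn times fuel t hi = 0 := by
  intro fuel
  induction fuel with
  | zero => intro t hi _; rw [pvScanB]
  | succ fuel ih =>
    intro t hi hnone
    rw [pvScanB]
    by_cases hth : t ≤ hi
    · rw [if_pos hth]
      have hfold : times.foldl (fun c x => c + PySem.Int.floordiv t x) 0 = pvCap times t := rfl
      rw [hfold]
      have hc : ¬ n ≤ pvCap times t := hnone t le_rfl hth
      rw [if_neg hc]
      have hstep1 : 1 ≤ pvStepB n times mn t (pvCap times t) :=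
        pvStep_pos n times mn t _
      exact ih _ hi (fun u hu1 hu2 => hnone u (by omega) hu2)
    · rw [if_neg hth]

-- A's bisection loop computes what B's scan computes
lemma pvLoop_eq (n : Int) (times : List Int) (mn R0 : Int)
    (hne : times ≠ []) (hpos : ∀ x ∈ times, 1 ≤ x)
    (hmn : PySem.List.min? times (fun x => x) = some mn) :
    ∀ (k : Nat) (left right answer : Int), (right + 1 - left).toNat ≤ k →
      mn ≤ left → right ≤ R0 →
      (∀ t, mn ≤ t → t < left → ¬ n ≤ pvCap times t) →
      (answer = 0 ∧ right = R0 ∨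
        answer = right + 1 ∧ mn ≤ answer ∧ answer ≤ R0 ∧ n ≤ pvCap times answer) →
      pvLoopA n times left right answer =
        pvScanB n mn times (R0 + 1 - mn).toNat mn R0 := by
  have hmnle : ∀ x ∈ times, mn ≤ x := fun x hx => PySem.List.min?_isMin hmn x hx
  have hmn1 : 1 ≤ mn := hpos mn (PySem.List.min?_mem hmn)
  intro k
  induction k with
  | zero =>
    intro left right answer hk hle hre hbelow hinv
    have hlr : ¬ left ≤ right := by omega
    rw [pvLoopA, dif_neg hlr]
    rcases hinv with ⟨ha, hr⟩ | ⟨ha, haL, haR, hPa⟩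
    · rw [ha]
      exact (pvScan_eq_zero n times mn _ mn R0
        (fun u hu1 hu2 => hbelow u hu1 (by omega))).symm
    · exact (pvScan_eq_first n times mn hne hpos hmnle hmn1 answer _ mn R0 le_rfl
        haL haR hPa (fun u hu1 hu2 => hbelow u hu1 (by omega))).symm
  | succ k ih =>
    intro left right answer hk hle hre hbelow hinv
    by_cases hlr : left ≤ right
    · rw [pvLoopA, dif_pos hlr]
      have hmid := PySem.Int.floordiv_two_mid_bounds hlr
      set mid := PySem.Int.floordiv (left + right) 2 with hmiddef
      have hm0 : 0 ≤ mid := by omega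
      have htest : (n ≤ pvPeopleA n mid times 0) ↔ n ≤ pvCap times mid :=
        pvPeople_iff n mid hm0 times hpos 0
      by_cases hc : n ≤ pvPeopleA n mid times 0
      · rw [if_pos hc]
        exact ih left (mid - 1) mid (by omega) hle (by omega) hbelow
          (Or.inr ⟨by omega, by omega, by omega, htest.1 hc⟩)
      · rw [if_neg hc]
        have hnP : ¬ n ≤ pvCap times mid := fun h => hc (htest.2 h)
        refine ih (mid + 1) right answer (by omega) (by omega) hre ?_ ?_
        · intro t htmn ht
          by_cases htl : t < left
          · exact hbelow t htmn htl
          · intro hPt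
            exact hnP (le_trans hPt (pvCap_mono times hpos (by omega)))
        · rcases hinv with ⟨ha, hr⟩ | h
          · exact Or.inl ⟨ha, hr⟩
          · exact Or.inr h
    · rw [pvLoopA, dif_neg hlr]
      rcases hinv with ⟨ha, hr⟩ | ⟨ha, haL, haR, hPa⟩
      · rw [ha]
        exact (pvScan_eq_zero n times mn _ mn R0
          (fun u hu1 hu2 => hbelow u hu1 (by omega))).symm
      · exact (pvScan_eq_first n times mn hne hpos hmnle hmn1 answer _ mn R0 le_rfl
          haL haR hPa (fun u hu1 hu2 => hbelow u hu1 (by omega))).symm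

-- ===== VERDICT (by name: the statement is the Claim_ definition above) =====
theorem solution_spec : Claim_equal_solution := by
  intro n times _hdom hpre
  obtain ⟨hne, hor⟩ := hpre
  unfold Spec_solution solution solution_alt
  cases hmn : PySem.List.min? times (fun x => x) with
  | none => exact absurd ((PySem.List.min?_eq_none_iff _ _).1 hmn) hne
  | some mn =>
    cases hmx : PySem.List.max? times (fun x => x) with
    | none => exact absurd ((PySem.List.max?_eq_none_iff _ _).1 hmx) hne
    | some mx =>
      rcases hor with hpos | hlt
      · have hmn1 : 1 ≤ mn := hpos mn (PySem.List.min?_mem hmn)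
        exact pvLoop_eq n times mn (mx * n) hne hpos hmn
          (mx * n + 1 - mn).toNat mn (mx * n) 0 le_rfl le_rfl le_rfl
          (fun t ht1 ht2 => absurd ht2 (not_lt.2 ht1))
          (Or.inl ⟨rfl, rfl⟩)
      · rw [hmn, hmx] at hlt
        simp only [Option.getD_some] at hlt
        have hnl : ¬ mn ≤ mx * n := by omega
        have hf : (mx * n + 1 - mn).toNat = 0 := by omega
        simp [hnl, hf, pvScanB, pvLoopA]
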